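-- pv_equiv track=rewrite | github.com/Jonwberg/Oficio-Taller-Marketing | scripts/sheets_sync.py | calc_milestone_statuses
-- ===== SOURCE A (Python) =====
-- PHASE_SEQUENCE = ["scope_signed", "conceptual", "anteproyecto", "ejecutivo", "complete"]
--
-- MILESTONE_TRIGGERS = ["scope_signed", "conceptual", "anteproyecto", "ejecutivo"]
--
-- def calc_milestone_statuses(current_phase: str, project_status: str) -> list[str]:
--     """
--     Return ["collected"|"projected", ...] for M1–M4.
--     All collected if project_status == "built".
--     Otherwise, milestone is collected if its trigger <= current_phase in PHASE_SEQUENCE.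
--     """
--     if project_status == "built":
--         return ["collected", "collected", "collected", "collected"]
--     try:
--         current_idx = PHASE_SEQUENCE.index(current_phase)
--     except ValueError:
--         current_idx = -1
--     return [
--         "collected" if PHASE_SEQUENCE.index(trigger) <= current_idx else "projected"
--         for trigger in MILESTONE_TRIGGERS
--     ]
-- ===== SOURCE B (Python) =====
-- PHASE_SEQUENCE = ["scope_signed", "conceptual", "anteproyecto", "ejecutivo", "complete"]
--
-- def calc_milestone_statuses(current_phase: str, project_status: str) -> list[str]:
--     if project_status == "built":
--         return ["collected"] * 4
--     try:
--         current_idx = PHASE_SEQUENCE.index(current_phase)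
--     except ValueError:
--         current_idx = -1
--     collected = max(0, min(current_idx + 1, 4))
--     return ["collected"] * collected + ["projected"] * (4 - collected)
-- ===== Notes on version B (the rewrite author's own statement) =====
-- stated objective: simpler
-- what changed: Replaces the per-trigger membership/index comprehension with a single closed-form count (clamped current_idx+1) and arithmetic list construction, exploiting that the four triggers are exactly the first four phases.
import Mathlib
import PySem

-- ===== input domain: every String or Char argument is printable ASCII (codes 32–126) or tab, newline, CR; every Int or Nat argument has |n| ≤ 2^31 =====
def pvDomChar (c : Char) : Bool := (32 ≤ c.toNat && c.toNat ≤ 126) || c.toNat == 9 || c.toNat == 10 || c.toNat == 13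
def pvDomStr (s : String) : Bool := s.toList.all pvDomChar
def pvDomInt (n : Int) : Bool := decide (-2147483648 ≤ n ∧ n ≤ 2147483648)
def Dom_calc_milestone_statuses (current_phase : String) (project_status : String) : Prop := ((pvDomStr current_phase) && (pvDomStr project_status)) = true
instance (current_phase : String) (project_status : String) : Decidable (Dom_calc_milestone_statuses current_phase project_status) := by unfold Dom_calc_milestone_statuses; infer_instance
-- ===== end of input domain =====

-- B replaces the per-trigger index comprehension with one closed-form clamped count; objective: simpler.

-- ===== PORT A =====
def pvPhaseSequence : List String := ["scope_signed", "conceptual", "anteproyecto", "ejecutivo", "complete"]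
def pvMilestoneTriggers : List String := ["scope_signed", "conceptual", "anteproyecto", "ejecutivo"]

def calc_milestone_statuses (current_phase : String) (project_status : String) : List String :=
  if project_status = "built" then ["collected", "collected", "collected", "collected"]
  else
    -- try/except ValueError → -1
    let current_idx : Int :=
      match PySem.List.index? pvPhaseSequence current_phase with
      | some i => (i : Int)
      | none => -1
    -- PHASE_SEQUENCE.index(trigger) always succeeds: every trigger is in the sequence,
    -- so getD 0 is never the fallback and the port is exact
    pvMilestoneTriggers.map (fun trigger =>
      if ((PySem.List.index? pvPhaseSequence trigger).getD 0 : Int) ≤ current_idx then "collected"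
      else "projected")

-- ===== PORT B =====
def calc_milestone_statuses_alt (current_phase : String) (project_status : String) : List String :=
  if project_status = "built" then List.replicate 4 "collected"
  else
    let current_idx : Int :=
      match PySem.List.index? pvPhaseSequence current_phase with
      | some i => (i : Int)
      | none => -1
    let collected : Int := max 0 (min (current_idx + 1) 4)
    List.replicate collected.toNat "collected" ++ List.replicate (4 - collected.toNat) "projected"

-- ===== PRECONDITION & SPEC =====
def Spec_calc_milestone_statuses (current_phase : String) (project_status : String) (out : List String) : Prop := out = calc_milestone_statuses_alt current_phase project_status
instance (current_phase : String) (project_status : String) (out : List String) : Decidable (Spec_calc_milestone_statuses current_phase project_status out) := by unfold Spec_calc_milestone_statuses; infer_instance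

-- ===== CLAIM (what is proved, stated in full; the proofs are below) =====
def Claim_equal_calc_milestone_statuses : Prop := ∀ (current_phase : String) (project_status : String), Dom_calc_milestone_statuses current_phase project_status → Spec_calc_milestone_statuses current_phase project_status (calc_milestone_statuses current_phase project_status)

-- ===== LEMMAS AND PROOFS =====

-- ===== VERDICT (by name: the statement is the Claim_ definition above) =====
theorem calc_milestone_statuses_spec : Claim_equal_calc_milestone_statuses := by
  unfold Claim_equal_calc_milestone_statuses Spec_calc_milestone_statuses
  intro cp ps _
  unfold calc_milestone_statuses calc_milestone_statuses_alt
  by_cases hb : ps = "built"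
  · simp [hb]
  · simp only [if_neg hb]
    by_cases h0 : cp = "scope_signed"
    · subst h0; decide
    by_cases h1 : cp = "conceptual"
    · subst h1; decide
    by_cases h2 : cp = "anteproyecto"
    · subst h2; decide
    by_cases h3 : cp = "ejecutivo"
    · subst h3; decide
    by_cases h4 : cp = "complete"
    · subst h4; decide
    have hn : PySem.List.index? pvPhaseSequence cp = none := by
      rw [PySem.List.index?_eq_none_iff]
      simp [pvPhaseSequence]
      exact ⟨fun h => h0 h, fun h => h1 h, fun h => h2 h,
             fun h => h3 h, fun h => h4 h⟩
    rw [hn]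
    decide
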